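-- pv_equiv track=rewrite | github.com/cmh1027/bakjoon | 브루트포스/3085.py | countRowCandy
-- ===== SOURCE A (Python) =====
-- def countRowCandy(M, N, i):
--     maxSequence = 0
--     currentSequence = 0
--     current = -1
--     for j in range(N):
--         if M[i][j] == current:
--             currentSequence += 1
--         else:
--             if maxSequence < currentSequence:
--                 maxSequence = currentSequence
--             current = M[i][j]
--             currentSequence = 1
--     if maxSequence < currentSequence:
--         maxSequence = currentSequence
--     return maxSequence
-- ===== SOURCE B (Python) =====
-- def countRowCandy(M, N, i):
--     row = [M[i][j] for j in range(N)]
--     return _longest(row)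
--
-- def _prefix_run(xs):
--     # length of the maximal initial run of equal elements (1 for a singleton)
--     if len(xs) >= 2 and xs[1] == xs[0]:
--         return 1 + _prefix_run(xs[1:])
--     return 1
--
-- def _longest(row):
--     # divide and conquer: longest run = max of the halves and the run crossing the cut
--     n = len(row)
--     if n <= 1:
--         return n
--     mid = n // 2
--     left, right = row[:mid], row[mid:]
--     best = max(_longest(left), _longest(right))
--     if left[-1] == right[0]:
--         best = max(best, _prefix_run(left[::-1]) + _prefix_run(right))
--     return best
-- ===== Notes on version B (the rewrite author's own statement) =====
-- stated objective: alternative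
-- what changed: Replaces A's single-pass running-counter/sentinel scan with a divide-and-conquer recursion: the longest run is the max of the two halves and of the run crossing the cut (suffix run of the left half + prefix run of the right half).
import Mathlib
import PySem

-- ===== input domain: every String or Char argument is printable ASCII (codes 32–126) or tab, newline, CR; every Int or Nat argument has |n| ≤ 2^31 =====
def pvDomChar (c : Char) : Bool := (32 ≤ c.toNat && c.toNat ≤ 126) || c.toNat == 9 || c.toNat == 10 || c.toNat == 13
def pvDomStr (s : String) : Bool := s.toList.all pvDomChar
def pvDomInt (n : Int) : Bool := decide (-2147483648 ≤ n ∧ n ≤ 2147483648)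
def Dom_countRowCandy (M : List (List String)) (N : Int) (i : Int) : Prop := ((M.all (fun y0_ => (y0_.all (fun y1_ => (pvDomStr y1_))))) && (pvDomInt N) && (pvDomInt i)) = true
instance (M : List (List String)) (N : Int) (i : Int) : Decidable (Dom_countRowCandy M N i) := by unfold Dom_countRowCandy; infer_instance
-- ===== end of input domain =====

-- B replaces A's running-counter/sentinel scan by a divide-and-conquer recursion
-- (longest run = max of the halves and of the run crossing the cut): a genuinely
-- different algorithm of similar size (alternative; not claimed faster).


-- ===== PORT A =====
-- The Python sentinel 'current = -1' (an int, never equal to a string element) is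
-- modelled as 'none : Option String'; element access M[i][j] is PySem.List.pyGet?
-- (none = IndexError, excluded by Pre_; the '.getD ""' default is unreachable inside Pre_).
def countRowCandy (M : List (List String)) (N : Int) (i : Int) : Int :=
  let st := (PySem.List.pyRange 0 N 1).foldl
    (fun (s : Int × Int × Option String) j =>
      let x := ((PySem.List.pyGet? M i).bind (fun row => PySem.List.pyGet? row j)).getD ""
      if some x == s.2.2 then (s.1, s.2.1 + 1, s.2.2)
      else ((if s.1 < s.2.1 then s.2.1 else s.1), 1, some x))
    (0, 0, none)
  if st.1 < st.2.1 then st.2.1 else st.1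

-- ===== PORT B =====
-- _prefix_run(xs): length of the maximal initial run of equal elements.
def pvPrefRun : List String → Int
  | x :: y :: rest => if y == x then 1 + pvPrefRun (y :: rest) else 1
  | _ => 1

-- _longest(row): divide and conquer.  row[:mid] / row[mid:] with 0 ≤ mid ≤ len are
-- exactly List.take / List.drop; row[::-1] is List.reverse; left[-1] / right[0] are
-- PySem.List.pyGet? (both halves nonempty here, so the '.getD ""' default is unreachable).
def pvLongest (row : List String) : Int :=
  if _h : row.length ≤ 1 then (row.length : Int)
  else
    let mid := row.length / 2
    let left := row.take mid
    let right := row.drop mid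
    let best := max (pvLongest left) (pvLongest right)
    if (PySem.List.pyGet? left (-1)).getD "" == (PySem.List.pyGet? right 0).getD "" then
      max best (pvPrefRun left.reverse + pvPrefRun right)
    else best
  termination_by row.length
  decreasing_by
    · simp only [List.length_take]; omega
    · simp only [List.length_drop]; omega

def countRowCandy_alt (M : List (List String)) (N : Int) (i : Int) : Int :=
  let row := (PySem.List.pyRange 0 N 1).map
    (fun j => ((PySem.List.pyGet? M i).bind (fun r => PySem.List.pyGet? r j)).getD "")
  pvLongest row

-- ===== PRECONDITION & SPEC =====
-- Pre_ excludes exactly the inputs where Python A raises IndexError: N > 0 with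
-- row index i out of range, or N exceeding the selected row's length.
def Pre_countRowCandy (M : List (List String)) (N : Int) (i : Int) : Prop :=
  N ≤ 0 ∨ (PySem.List.pyGet? M i ≠ none ∧ N ≤ (((PySem.List.pyGet? M i).getD []).length : Int))
instance (M : List (List String)) (N : Int) (i : Int) : Decidable (Pre_countRowCandy M N i) := by unfold Pre_countRowCandy; infer_instance

def pvWitness_countRowCandy : List (List String) × Int × Int :=
  ([["a", "a", "b"], ["c"]], 3, 0)

def Spec_countRowCandy (M : List (List String)) (N : Int) (i : Int) (out : Int) : Prop := out = countRowCandy_alt M N i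
instance (M : List (List String)) (N : Int) (i : Int) (out : Int) : Decidable (Spec_countRowCandy M N i out) := by unfold Spec_countRowCandy; infer_instance

-- ===== CLAIM (what is proved, stated in full; the proofs are below) =====
def Claim_equal_countRowCandy : Prop := ∀ (M : List (List String)) (N : Int) (i : Int), Dom_countRowCandy M N i → Pre_countRowCandy M N i → Spec_countRowCandy M N i (countRowCandy M N i)

-- ===== LEMMAS AND PROOFS =====

-- The common yardstick both ports are proved equal to: the list of maximal-run
-- lengths of the row, reduced by a 0-seeded max.
def pvGroupLens : List String → List Int
  | [] => []
  | x :: xs =>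
      (1 + ((xs.takeWhile (fun y => y == x)).length : Int))
        :: pvGroupLens (xs.dropWhile (fun y => y == x))
  termination_by l => l.length
  decreasing_by
    simp only [List.length_cons]
    exact Nat.lt_succ_of_le (List.length_dropWhile_le _ _)

def pvMax0 (l : List Int) : Int := l.foldl max 0

def pvLR (l : List String) : Int := pvMax0 (pvGroupLens l)

-- ---- A side (loop ⇒ pvLR) ----

def pvLoopA : List String → Int → Int → Option String → Int
  | [], m, c, _ => if m < c then c else m
  | x :: xs, m, c, cur =>
      if some x == cur then pvLoopA xs m (c + 1) cur
      else pvLoopA xs (if m < c then c else m) 1 (some x)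

theorem pvIfMax (m c : Int) : (if m < c then c else m) = max m c := by
  rcases lt_or_ge m c with h | h
  · simp [h, max_eq_right h.le]
  · simp [not_lt.mpr h, max_eq_left h]

theorem pvFoldl_max_max (l : List Int) (a b : Int) :
    l.foldl max (max a b) = max a (l.foldl max b) := by
  induction l generalizing b with
  | nil => simp
  | cons x xs ih => simp only [List.foldl_cons, max_assoc, ih]

theorem pvMax0_cons (k : Int) (gs : List Int) : pvMax0 (k :: gs) = max k (pvMax0 gs) := by
  simp only [pvMax0, List.foldl_cons]
  rw [max_comm 0 k, pvFoldl_max_max]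

theorem pvLR_cons (x : String) (xs : List String) :
    pvLR (x :: xs) = max (1 + ((xs.takeWhile (fun y => y == x)).length : Int))
      (pvLR (xs.dropWhile (fun y => y == x))) := by
  rw [pvLR, pvGroupLens, pvMax0_cons]; rfl

theorem pvLR_nonneg (l : List String) : 0 ≤ pvLR l := by
  have : ∀ gs : List Int, ∀ a : Int, a ≤ gs.foldl max a := by
    intro gs
    induction gs with
    | nil => intro a; simp
    | cons g t ih => intro a; exact le_trans (le_max_left a g) (ih _)
  exact this _ 0

-- key invariant: A's loop in the middle of a run of x (count so far c) computes
-- max m (max (c + rest of this run) (max over the later runs)).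
theorem pvLoopA_some (xs : List String) (x : String) (m c : Int) (hc : 0 ≤ c) :
    pvLoopA xs m c (some x) =
      max m (max (c + ((xs.takeWhile (fun y => y == x)).length : Int))
                 (pvLR (xs.dropWhile (fun y => y == x)))) := by
  induction xs generalizing x m c with
  | nil =>
      simp only [pvLoopA, List.takeWhile_nil, List.dropWhile_nil, pvLR, pvGroupLens, pvMax0,
        List.foldl_nil, List.length_nil, Int.ofNat_zero, add_zero]
      rw [max_eq_left hc, pvIfMax]
  | cons y ys ih =>
      by_cases h : y = x
      · subst h
        simp only [pvLoopA, List.takeWhile_cons, List.dropWhile_cons, beq_self_eq_true,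
          if_true, List.length_cons]
        rw [ih y m (c + 1) (by omega)]
        congr 2
        push_cast
        ring
      · have hb : (y == x) = false := beq_eq_false_iff_ne.mpr h
        have hxy : (some y == some x) = false := by simp [h]
        simp only [pvLoopA, List.takeWhile_cons, List.dropWhile_cons, hb, hxy,
          Bool.false_eq_true, if_false, List.length_nil]
        rw [ih y (if m < c then c else m) 1 (by omega), pvIfMax]
        rw [pvLR_cons]
        simp only [Int.ofNat_zero, add_zero]
        rw [max_assoc, add_comm (1 : Int)]

theorem pvLoopA_eq_LR (l : List String) : pvLoopA l 0 0 none = pvLR l := by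
  cases l with
  | nil => simp [pvLoopA, pvLR, pvGroupLens, pvMax0]
  | cons x xs =>
      have hne : (some x == (none : Option String)) = false := rfl
      simp only [pvLoopA, hne, Bool.false_eq_true, if_false, lt_irrefl]
      rw [pvLoopA_some xs x 0 1 (by omega), pvLR_cons]
      exact max_eq_right (le_max_of_le_left (by positivity))

-- A's fold over indices with inline access = pvLoopA over the materialised row.
theorem pvA_eq (r : List Int) (g : Int → String) (m c : Int) (cur : Option String) :
    (fun st : Int × Int × Option String => if st.1 < st.2.1 then st.2.1 else st.1)
      (r.foldl
        (fun (s : Int × Int × Option String) j =>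
          if some (g j) == s.2.2 then (s.1, s.2.1 + 1, s.2.2)
          else ((if s.1 < s.2.1 then s.2.1 else s.1), 1, some (g j))) (m, c, cur)) =
    pvLoopA (r.map g) m c cur := by
  induction r generalizing m c cur with
  | nil => rfl
  | cons j r ih =>
      simp only [List.foldl_cons, List.map_cons, pvLoopA]
      by_cases h : (some (g j) == cur) = true
      · simp only [h, if_true]
        exact ih m (c + 1) cur
      · simp only [h, Bool.false_eq_true, if_false]
        exact ih _ 1 (some (g j))

-- ---- B side (divide and conquer ⇒ pvLR) ----

theorem pvPrefRun_eq (x : String) (xs : List String) :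
    pvPrefRun (x :: xs) = 1 + ((xs.takeWhile (fun y => y == x)).length : Int) := by
  induction xs generalizing x with
  | nil => simp [pvPrefRun]
  | cons y ys ih =>
      by_cases h : y = x
      · subst h
        simp only [pvPrefRun, beq_self_eq_true, if_true, List.takeWhile_cons, List.length_cons]
        rw [ih y]; push_cast; ring
      · have hb : (y == x) = false := beq_eq_false_iff_ne.mpr h
        simp [pvPrefRun, hb]

theorem pvTakeWhile_all {p : String → Bool} {s : List String} (h : ∀ y ∈ s, p y = true)
    (rest : List String) : (s ++ rest).takeWhile p = s ++ rest.takeWhile p := by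
  induction s with
  | nil => simp
  | cons a t ih =>
      simp only [List.cons_append, List.takeWhile_cons, h a List.mem_cons_self, if_true]
      rw [ih fun y hy => h y (List.mem_cons_of_mem a hy)]

theorem pvDropWhile_all {p : String → Bool} {s : List String} (h : ∀ y ∈ s, p y = true)
    (rest : List String) : (s ++ rest).dropWhile p = rest.dropWhile p := by
  induction s with
  | nil => simp
  | cons a t ih =>
      simp only [List.cons_append, List.dropWhile_cons, h a List.mem_cons_self, if_true]
      exact ih fun y hy => h y (List.mem_cons_of_mem a hy)

theorem pvTakeWhile_stop (p : String → Bool) (s rest : List String)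
    (h : (∀ y ∈ s, p y = true) → ∀ y, rest.head? = some y → p y = false) :
    (s ++ rest).takeWhile p = s.takeWhile p := by
  induction s with
  | nil =>
      cases rest with
      | nil => rfl
      | cons r t => simp [h (by simp) r rfl]
  | cons a t ih =>
      by_cases hp : p a = true
      · simp only [List.cons_append, List.takeWhile_cons, hp, if_true]
        rw [ih fun hall => h fun y hy => by
          rcases List.mem_cons.mp hy with h1 | h2
          · exact h1 ▸ hp
          · exact hall y h2]
      · simp [hp]

theorem pvGetLast?_append (s d : List String) (hd : d ≠ []) :
    (s ++ d).getLast? = d.getLast? := by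
  induction s with
  | nil => rfl
  | cons a t ih =>
      cases ht : t ++ d with
      | nil => exact absurd (List.append_eq_nil_iff.mp ht).2 hd
      | cons z zs =>
          rw [List.cons_append, ht, List.getLast?_cons_cons, ← ht, ih]

-- suffix run is unchanged by prepending a run of a different value:
-- pvPrefRun (x-run ++ d).reverse = pvPrefRun d.reverse when head d ≠ x.
theorem pvSufRun_drop (x : String) (a d : List String) (ha : ∀ y ∈ a, y = x)
    (hd : d ≠ []) (hhead : ∀ y, d.head? = some y → y ≠ x) :
    pvPrefRun ((x :: (a ++ d)).reverse) = pvPrefRun d.reverse := by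
  obtain ⟨d0, d', rfl⟩ : ∃ d0 d', d = d0 :: d' := by
    cases d with
    | nil => exact absurd rfl hd
    | cons d0 d' => exact ⟨d0, d', rfl⟩
  have hd0x : d0 ≠ x := hhead d0 rfl
  obtain ⟨c, s, hrev⟩ : ∃ c s, (d0 :: d').reverse = c :: s := by
    cases hr : (d0 :: d').reverse with
    | nil => exact absurd (by simpa using congrArg List.reverse hr) (List.cons_ne_nil d0 d')
    | cons c s => exact ⟨c, s, rfl⟩
  have hsplit : (x :: (a ++ d0 :: d')).reverse = c :: (s ++ (a.reverse ++ [x])) := by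
    rw [List.reverse_cons, List.reverse_append, hrev, List.append_assoc, List.cons_append]
  rw [hsplit, hrev, pvPrefRun_eq, pvPrefRun_eq,
    pvTakeWhile_stop (fun y => y == c) s (a.reverse ++ [x]) ?_]
  intro hall y hy
  -- the head of a.reverse ++ [x] is x (a is a run of x)
  have hyx : y = x := by
    cases harev : a.reverse with
    | nil => rw [harev] at hy; simpa using hy.symm
    | cons q qs =>
        rw [harev] at hy
        have hq : y = q := by simpa using hy.symm
        have : q ∈ a := List.mem_reverse.mp (harev ▸ List.mem_cons_self)
        exact hq ▸ ha q this
  -- all of s equals c, so all of d equals c, so d0 = c and c ≠ x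
  have hdc : d0 = c := by
    have : d0 ∈ c :: s := by rw [← hrev]; simp
    rcases List.mem_cons.mp this with h1 | h2
    · exact h1
    · exact beq_iff_eq.mp (hall d0 h2)
  subst hyx
  exact beq_eq_false_iff_ne.mpr fun h => hd0x (hdc.trans h.symm) |>.elim

theorem pvPrefRun_all (x : String) (s : List String) (hs : ∀ y ∈ s, y = x) :
    pvPrefRun (x :: s) = 1 + (s.length : Int) := by
  rw [pvPrefRun_eq]
  congr 2
  rw [List.takeWhile_eq_self_iff.mpr fun y hy => beq_iff_eq.mpr (hs y hy)]

theorem pvGetLast?_all (x : String) (s : List String) (hs : ∀ y ∈ s, y = x) :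
    (x :: s).getLast? = some x := by
  cases hg : (x :: s).getLast? with
  | none => simp at hg
  | some g =>
      have hgmem : g ∈ x :: s := List.mem_of_getLast? hg
      rcases List.mem_cons.mp hgmem with h1 | h2
      · rw [h1]
      · rw [hs g h2]

-- the crossing-run decomposition of pvLR over an append
theorem pvLR_append (n : Nat) : ∀ (u v : List String) (gx hy : String), u.length ≤ n →
    u.getLast? = some gx → v.head? = some hy →
    pvLR (u ++ v) =
      if gx == hy then max (max (pvLR u) (pvLR v)) (pvPrefRun u.reverse + pvPrefRun v)
      else max (pvLR u) (pvLR v) := by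
  induction n with
  | zero =>
      intro u v gx hy hlen hg _
      interval_cases h : u.length
      rw [List.length_eq_zero_iff.mp h] at hg; simp at hg
  | succ n ih =>
      intro u v gx hy hlen hg hh
      cases u with
      | nil => simp at hg
      | cons x u' =>
        obtain ⟨rt, rfl⟩ : ∃ rt, v = hy :: rt := by
          cases v with
          | nil => simp at hh
          | cons z zs =>
              have hz : z = hy := by simpa using hh
              exact ⟨zs, by rw [hz]⟩
        set a := u'.takeWhile (fun y => y == x) with ha_def
        set d := u'.dropWhile (fun y => y == x) with hd_def
        have hu' : u' = a ++ d := (List.takeWhile_append_dropWhile).symm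
        have ha_all : ∀ y ∈ a, y = x := by
          intro y hy
          rw [ha_def] at hy
          exact beq_iff_eq.mp (List.mem_takeWhile_imp (p := fun z => z == x) (l := u') hy)
        by_cases hdnil : d = []
        · -- u is a single run of x
          have hall : ∀ y ∈ u', y = x := by
            intro y hy
            rw [hu', hdnil, List.append_nil] at hy
            exact ha_all y hy
          have hgx : gx = x := by
            rw [pvGetLast?_all x u' hall] at hg
            exact (Option.some.injEq _ _ ▸ hg.symm)
          rw [hgx]
          have hlr_u : pvLR (x :: u') = 1 + (u'.length : Int) := by
            rw [pvLR_cons,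
              List.takeWhile_eq_self_iff.mpr fun y hy => beq_iff_eq.mpr (hall y hy),
              List.dropWhile_eq_nil_iff.mpr fun y hy => beq_iff_eq.mpr (hall y hy)]
            have h0 : pvLR ([] : List String) = 0 := by simp [pvLR, pvGroupLens, pvMax0]
            exact max_eq_left (by rw [h0]; positivity)
          have hpref_u : pvPrefRun (x :: u').reverse = 1 + (u'.length : Int) := by
            obtain ⟨c, s, hrev⟩ : ∃ c s, (x :: u').reverse = c :: s := by
              cases hr : (x :: u').reverse with
              | nil => exact absurd (by simpa using congrArg List.reverse hr) (List.cons_ne_nil x u')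
              | cons c s => exact ⟨c, s, rfl⟩
            have hcmem : c ∈ x :: u' := by
              rw [← List.mem_reverse, hrev]; exact List.mem_cons_self
            have hc : c = x := by
              rcases List.mem_cons.mp hcmem with h1 | h2
              · exact h1
              · exact hall c h2
            have hsall : ∀ y ∈ s, y = x := by
              intro y hy
              have : y ∈ (x :: u').reverse := by rw [hrev]; exact List.mem_cons_of_mem c hy
              rcases List.mem_cons.mp (List.mem_reverse.mp this) with h1 | h2
              · exact h1
              · exact hall y h2
            have hslen : s.length = u'.length := by
              have := congrArg List.length hrev
              simp at this; omega
            rw [hrev, hc, pvPrefRun_all x s hsall, hslen]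
          by_cases hxr : x = hy
          · rw [← hxr]
            simp only [beq_self_eq_true, if_true]
            rw [List.cons_append, pvLR_cons,
                pvTakeWhile_all (fun y hy => beq_iff_eq.mpr (hall y hy)),
                pvDropWhile_all (fun y hy => beq_iff_eq.mpr (hall y hy))]
            simp only [List.takeWhile_cons, beq_self_eq_true, if_true, List.dropWhile_cons,
              List.length_append, List.length_cons]
            rw [hlr_u, hpref_u, pvLR_cons, pvPrefRun_eq]
            have h3 := pvLR_nonneg (rt.dropWhile (fun y => y == x))
            push_cast
            omega
          · have hne : (x == hy) = false := beq_eq_false_iff_ne.mpr hxr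
            have hne' : (hy == x) = false := beq_eq_false_iff_ne.mpr fun h => hxr h.symm
            simp only [hne, Bool.false_eq_true, if_false]
            rw [List.cons_append, pvLR_cons,
                pvTakeWhile_all (fun y hy => beq_iff_eq.mpr (hall y hy)),
                pvDropWhile_all (fun y hy => beq_iff_eq.mpr (hall y hy)), hlr_u]
            simp only [List.takeWhile_cons, hne', Bool.false_eq_true, if_false,
              List.dropWhile_cons, List.append_nil]
        · -- the first run of u ends inside u: peel it and recurse on d
          have hd_head : ∀ y, d.head? = some y → y ≠ x := by
            intro y hy
            have := List.head?_dropWhile_not (fun y => y == x) u'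
            rw [← hd_def, hy] at this
            simp at this
            exact this
          have hdlen : d.length ≤ n := by
            have h1 : d.length ≤ u'.length := List.length_dropWhile_le _ _
            simp at hlen; omega
          have hglast : d.getLast? = some gx := by
            rw [hu'] at hg
            rw [show x :: (a ++ d) = (x :: a) ++ d from rfl] at hg
            rwa [pvGetLast?_append (x :: a) d hdnil] at hg
          obtain ⟨dh, dt, hdc⟩ : ∃ dh dt, d = dh :: dt := by
            cases hd : d with
            | nil => exact absurd hd hdnil
            | cons dh dt => exact ⟨dh, dt, rfl⟩
          have hdh_some : d.head? = some dh := by rw [hdc]; rfl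
          have ih_app := ih d (hy :: rt) gx hy hdlen hglast rfl
          have hlhs : pvLR ((x :: u') ++ hy :: rt) =
              max (1 + (a.length : Int)) (pvLR (d ++ hy :: rt)) := by
            rw [List.cons_append, pvLR_cons, hu', List.append_assoc]
            rw [pvTakeWhile_stop _ _ _ (fun _ y hy => by
                  rw [hdc] at hy
                  have hydh : y = dh := by simpa using hy.symm
                  subst hydh
                  exact beq_eq_false_iff_ne.mpr (hd_head y hdh_some)),
                pvDropWhile_all (fun y hy => beq_iff_eq.mpr (ha_all y hy))]
            rw [List.takeWhile_eq_self_iff.mpr fun y hy => beq_iff_eq.mpr (ha_all y hy)]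
            congr 1
            rw [hdc]
            simp only [List.cons_append, List.dropWhile_cons]
            rw [beq_eq_false_iff_ne.mpr (hd_head dh hdh_some)]
            simp
          have hlr_u : pvLR (x :: u') = max (1 + (a.length : Int)) (pvLR d) := by
            rw [pvLR_cons, ← ha_def, ← hd_def]
          have hsuf : pvPrefRun (x :: u').reverse = pvPrefRun d.reverse := by
            rw [hu']
            exact pvSufRun_drop x a d ha_all hdnil hd_head
          rw [hlhs, ih_app, hlr_u, hsuf]
          have h3 := pvLR_nonneg d
          have h4 := pvLR_nonneg (hy :: rt)
          by_cases hcx : gx = hy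
          · simp only [beq_iff_eq.mpr hcx, if_true]
            have h5 : (0:Int) ≤ pvPrefRun d.reverse + pvPrefRun (hy :: rt) := by
              rw [hdc]
              obtain ⟨c, s, hrev⟩ : ∃ c s, (dh :: dt).reverse = c :: s := by
                cases hr : (dh :: dt).reverse with
                | nil => exact absurd (by simpa using congrArg List.reverse hr) (List.cons_ne_nil dh dt)
                | cons c s => exact ⟨c, s, rfl⟩
              rw [hrev, pvPrefRun_eq, pvPrefRun_eq]
              have := Int.natCast_nonneg ((s.takeWhile (fun y => y == c)).length)
              have := Int.natCast_nonneg ((rt.takeWhile (fun y => y == hy)).length)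
              omega
            omega
          · simp only [beq_eq_false_iff_ne.mpr hcx, Bool.false_eq_true, if_false]
            omega

theorem pvLongest_eq (n : Nat) : ∀ l : List String, l.length ≤ n → pvLongest l = pvLR l := by
  induction n with
  | zero =>
      intro l hl
      interval_cases h : l.length
      rw [List.length_eq_zero_iff.mp h]
      simp [pvLongest, pvLR, pvGroupLens, pvMax0]
  | succ n ih =>
      intro l hl
      by_cases h1 : l.length ≤ 1
      · rw [pvLongest, dif_pos h1]
        interval_cases h : l.length
        · rw [List.length_eq_zero_iff.mp h]; simp [pvLR, pvGroupLens, pvMax0]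
        · obtain ⟨x, hx⟩ := List.length_eq_one_iff.mp h
          subst hx
          rw [pvLR_cons]
          simp [pvLR, pvGroupLens, pvMax0]
      · rw [pvLongest, dif_neg h1]
        show (if (PySem.List.pyGet? (l.take (l.length / 2)) (-1)).getD "" ==
                 (PySem.List.pyGet? (l.drop (l.length / 2)) 0).getD "" then
                max (max (pvLongest (l.take (l.length / 2))) (pvLongest (l.drop (l.length / 2))))
                  (pvPrefRun (l.take (l.length / 2)).reverse + pvPrefRun (l.drop (l.length / 2)))
              else max (pvLongest (l.take (l.length / 2))) (pvLongest (l.drop (l.length / 2)))) = pvLR l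
        have hlen2 : 2 ≤ l.length := by omega
        set mid := l.length / 2 with hmid
        have hmid1 : 1 ≤ mid := by omega
        have hmidlt : mid < l.length := by omega
        have hltake : (l.take mid).length = mid := by simp; omega
        have hldrop : (l.drop mid).length = l.length - mid := by simp
        obtain ⟨gx, hgx⟩ : ∃ gx, (l.take mid).getLast? = some gx := by
          cases hg : (l.take mid).getLast? with
          | none =>
              rw [List.getLast?_eq_none_iff] at hg
              rw [hg] at hltake; simp at hltake; omega
          | some g => exact ⟨g, rfl⟩
        obtain ⟨hy, hhy⟩ : ∃ hy, (l.drop mid).head? = some hy := by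
          cases hh : (l.drop mid).head? with
          | none =>
              rw [List.head?_eq_none_iff] at hh
              rw [hh] at hldrop; simp at hldrop; omega
          | some h => exact ⟨h, rfl⟩
        have hA := pvLR_append (l.take mid).length (l.take mid) (l.drop mid) gx hy le_rfl hgx hhy
        rw [List.take_append_drop] at hA
        have hihL : pvLongest (l.take mid) = pvLR (l.take mid) := ih _ (by omega)
        have hihR : pvLongest (l.drop mid) = pvLR (l.drop mid) := ih _ (by omega)
        obtain ⟨rt', hrt⟩ : ∃ rt', l.drop mid = hy :: rt' := by
          cases hdp : l.drop mid with
          | nil => rw [hdp] at hhy; simp at hhy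
          | cons z zs =>
              rw [hdp] at hhy
              have hz : z = hy := by simpa using hhy
              exact ⟨zs, congrArg (fun w => w :: zs) hz⟩
        rw [PySem.List.pyGet?_neg_one, hgx, hrt, PySem.List.pyGet?_zero_cons]
        simp only [Option.getD_some]
        rw [← hrt, hihL, hihR, hA]
        rfl

-- ===== VERDICT (by name: the statement is the Claim_ definition above) =====
theorem countRowCandy_spec : Claim_equal_countRowCandy := by
  intro M N i _ _
  show countRowCandy M N i = countRowCandy_alt M N i
  unfold countRowCandy countRowCandy_alt
  rw [show (∀ st : Int × Int × Option String,
        (if st.1 < st.2.1 then st.2.1 else st.1) =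
        (fun st : Int × Int × Option String => if st.1 < st.2.1 then st.2.1 else st.1) st)
      from fun _ => rfl]
  rw [pvA_eq, pvLoopA_eq_LR]
  exact (pvLongest_eq _ _ le_rfl).symm
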